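-- pv_equiv track=rewrite | github.com/Raedin24/leetcode | 2017.grid-game.py | gridGame
-- ===== SOURCE A (Python) =====
-- def gridGame(grid: list[list[int]]) -> int:
--     n = len(grid[0])
--     prefix_arr, second_arr = [0], [0]
--     res = []
--
--     for i in range(n):
--         prefix_arr.append(prefix_arr[i] + grid[0][i])
--         second_arr.append(second_arr[i] + grid[1][i])
--
--     for i in range(1, n+1):
--         res.append(max(second_arr[i-1], prefix_arr[-1]-prefix_arr[i]))
--
--     return min(res)
-- ===== SOURCE B (Python) =====
-- def gridGame(grid: list[list[int]]) -> int:
--     top, bot = grid[0], grid[1]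
--
--     def solve(lo: int, hi: int, bot_before: int, top_after: int) -> int:
--         # best over splits in columns [lo, hi); bot_before = second robot's points
--         # collected left of lo, top_after = first-row points remaining right of hi
--         if hi - lo <= 1:
--             return max(top_after, bot_before)
--         mid = (lo + hi) // 2
--         left = solve(lo, mid, bot_before, top_after + sum(top[mid:hi]))
--         right = solve(mid, hi, bot_before + sum(bot[lo:mid]), top_after)
--         return min(left, right)
--
--     return solve(0, len(top), 0, 0)
-- ===== Notes on version B (the rewrite author's own statement) =====
-- stated objective: alternative
-- what changed: Replaces the prefix-array build plus linear rescan with a recursive divide-and-conquer over the column interval: each half is solved independently given the bottom points accumulated to its left and the top points remaining to its right, and the two halves' optima are combined with min; no prefix arrays or candidate list exist.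
import Mathlib
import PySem

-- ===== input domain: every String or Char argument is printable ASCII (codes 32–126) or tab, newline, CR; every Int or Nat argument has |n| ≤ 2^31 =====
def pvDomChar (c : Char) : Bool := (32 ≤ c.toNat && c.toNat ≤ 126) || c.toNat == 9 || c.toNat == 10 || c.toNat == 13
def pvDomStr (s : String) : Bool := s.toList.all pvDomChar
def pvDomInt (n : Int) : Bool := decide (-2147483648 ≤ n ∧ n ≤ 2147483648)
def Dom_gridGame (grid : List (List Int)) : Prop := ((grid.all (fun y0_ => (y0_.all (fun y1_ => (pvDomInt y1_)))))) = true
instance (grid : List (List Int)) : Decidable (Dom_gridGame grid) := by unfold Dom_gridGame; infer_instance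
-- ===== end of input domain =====

-- B replaces A's prefix arrays and candidate rescan by a divide-and-conquer recursion
-- over the column interval (objective: alternative decomposition, no auxiliary arrays).

-- ===== PORT A =====
def gridGame (grid : List (List Int)) : Int :=
  let n : Int := PySem.List.len ((PySem.List.pyGet? grid 0).getD [])
  let st := (PySem.List.pyRange 0 n 1).foldl
    (fun (st : List Int × List Int) i =>
      (st.1 ++ [PySem.List.pyGetD st.1 i 0 + PySem.List.pyGetD ((PySem.List.pyGet? grid 0).getD []) i 0],
       st.2 ++ [PySem.List.pyGetD st.2 i 0 + PySem.List.pyGetD ((PySem.List.pyGet? grid 1).getD []) i 0]))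
    ([0], [0])
  let res := (PySem.List.pyRange 1 (n + 1) 1).foldl
    (fun (res : List Int) i =>
      res ++ [max (PySem.List.pyGetD st.2 (i - 1) 0)
                  (PySem.List.pyGetD st.1 (-1) 0 - PySem.List.pyGetD st.1 i 0)]) []
  (PySem.List.min? res (fun x => x)).getD 0

-- ===== PORT B =====
-- Source B's inner `solve(lo, hi, bot_before, top_after)`; lo/hi are the nonnegative column
-- indices of Source B, so Nat is exact ((lo+hi)//2 on nonnegative ints = Nat division).
def pvSolve (top bot : List Int) (lo hi : Nat) (botBefore topAfter : Int) : Int :=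
  if hi - lo ≤ 1 then max topAfter botBefore
  else
    let mid := (lo + hi) / 2
    let left := pvSolve top bot lo mid botBefore
      (topAfter + (PySem.List.slice top (some (mid : Int)) (some (hi : Int))).sum)
    let right := pvSolve top bot mid hi
      (botBefore + (PySem.List.slice bot (some (lo : Int)) (some (mid : Int))).sum) topAfter
    min left right
termination_by hi - lo
decreasing_by all_goals omega

def gridGame_alt (grid : List (List Int)) : Int :=
  let top := (PySem.List.pyGet? grid 0).getD []
  let bot := (PySem.List.pyGet? grid 1).getD []
  pvSolve top bot 0 (PySem.List.len top).toNat 0 0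

-- ===== PRECONDITION & SPEC =====
-- Pre_ excludes inputs on which A raises: fewer than two rows (IndexError on grid[0]/grid[1]),
-- an empty first row (min of an empty list, ValueError), or a second row shorter than the
-- first (IndexError on grid[1][i]).
def Pre_gridGame (grid : List (List Int)) : Prop :=
  2 ≤ grid.length ∧ grid.getD 0 [] ≠ [] ∧ (grid.getD 0 []).length ≤ (grid.getD 1 []).length
instance (grid : List (List Int)) : Decidable (Pre_gridGame grid) := by
  unfold Pre_gridGame; infer_instance
def pvWitness_gridGame : List (List Int) := [[2, 5, 4], [1, 5, 1]]

def Spec_gridGame (grid : List (List Int)) (out : Int) : Prop := out = gridGame_alt grid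
instance (grid : List (List Int)) (out : Int) : Decidable (Spec_gridGame grid out) := by unfold Spec_gridGame; infer_instance

-- ===== CLAIM (what is proved, stated in full; the proofs are below) =====
def Claim_equal_gridGame : Prop := ∀ (grid : List (List Int)), Dom_gridGame grid → Pre_gridGame grid → Spec_gridGame grid (gridGame grid)

-- ===== LEMMAS AND PROOFS =====

-- prefix-sum list [0, xs[0], xs[0]+xs[1], …] of length m+1
def pvPfx (xs : List Int) (m : Nat) : List Int :=
  (List.range (m + 1)).map (fun k => ((xs.take k).sum))

theorem pvPfx_getD (xs : List Int) (m k : Nat) (hk : k ≤ m) :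
    (pvPfx xs m).getD k 0 = (xs.take k).sum := by
  unfold pvPfx
  exact PySem.List.getD_map_range (fun k => ((xs.take k).sum)) (m + 1) k 0 (by omega)

theorem pvPfx_succ (xs : List Int) (m : Nat) :
    pvPfx xs (m + 1) = pvPfx xs m ++ [(xs.take (m + 1)).sum] := by
  unfold pvPfx
  rw [List.range_succ, List.map_append]
  rfl

theorem pv_loopA (r0 r1 : List Int) (m : Nat) (h0 : m ≤ r0.length) (h1 : m ≤ r1.length) :
    (PySem.List.pyRange 0 (m : Int) 1).foldl
      (fun (st : List Int × List Int) i =>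
        (st.1 ++ [PySem.List.pyGetD st.1 i 0 + PySem.List.pyGetD r0 i 0],
         st.2 ++ [PySem.List.pyGetD st.2 i 0 + PySem.List.pyGetD r1 i 0]))
      ([0], [0]) = (pvPfx r0 m, pvPfx r1 m) := by
  induction m with
  | zero => simp [PySem.List.pyRange_one_eq_nil, pvPfx]
  | succ m ih =>
    have hc : ((m + 1 : Nat) : Int) = (m : Int) + 1 := by push_cast; ring
    rw [hc, PySem.List.pyRange_one_succ_right (by positivity), List.foldl_append,
      ih (by omega) (by omega)]
    simp only [List.foldl_cons, List.foldl_nil, PySem.List.pyGetD_natCast]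
    rw [pvPfx_getD r0 m m le_rfl, pvPfx_getD r1 m m le_rfl,
      List.getD_eq_getElem r0 0 (by omega), List.getD_eq_getElem r1 0 (by omega),
      pvPfx_succ, pvPfx_succ,
      List.sum_take_succ r0 m (by omega), List.sum_take_succ r1 m (by omega)]

theorem pv_foldl_append_map (l : List Int) (f : Int → Int) (acc : List Int) :
    l.foldl (fun acc i => acc ++ [f i]) acc = acc ++ l.map f := by
  induction l generalizing acc with
  | nil => simp
  | cons x t ih => simp [ih]

theorem pvPfx_last (xs : List Int) (m : Nat) :
    PySem.List.pyGetD (pvPfx xs m) (-1) 0 = (xs.take m).sum := by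
  unfold pvPfx
  rw [List.range_succ, List.map_append, List.map_singleton,
    PySem.List.pyGetD_neg_one_append_singleton]

-- splitting a contiguous sum at a middle index
theorem pv_sum_split (xs : List Int) (a m h : Nat) (h1 : a ≤ m) (h2 : m ≤ h) :
    ((xs.drop a).take (m - a)).sum + ((xs.drop m).take (h - m)).sum
      = ((xs.drop a).take (h - a)).sum := by
  have he : h - a = (m - a) + (h - m) := by omega
  rw [he, List.take_add, List.sum_append, List.drop_drop]
  have : a + (m - a) = m := by omega
  rw [this]

-- Source B's solve computes the minimum over splits in [lo, hi) of the shifted candidates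
theorem pv_solve_eq (top bot : List Int) (d lo hi : Nat) (hd : hi - lo = d)
    (h : lo < hi) (b t : Int) :
    pvSolve top bot lo hi b t
      = (Finset.Ico lo hi).inf' (Finset.nonempty_Ico.mpr h)
          (fun i => max (t + ((top.drop (i + 1)).take (hi - (i + 1))).sum)
                        (b + ((bot.drop lo).take (i - lo)).sum)) := by
  induction d using Nat.strong_induction_on generalizing lo hi b t with
  | _ d ih =>
    rw [pvSolve]
    by_cases hb : hi - lo ≤ 1
    · have hhi : hi = lo + 1 := by omega
      subst hhi
      rw [if_pos hb]
      simp [Nat.Ico_succ_singleton]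
    · rw [if_neg hb]
      dsimp only
      have hlm : lo < (lo + hi) / 2 := by omega
      have hmh : (lo + hi) / 2 < hi := by omega
      rw [ih ((lo + hi) / 2 - lo) (by omega) lo ((lo + hi) / 2) rfl hlm,
          ih (hi - (lo + hi) / 2) (by omega) ((lo + hi) / 2) hi rfl hmh,
          PySem.List.slice_natCast, PySem.List.slice_natCast]
      have hL : ∀ i ∈ Finset.Ico lo ((lo + hi) / 2),
          max ((t + ((top.drop ((lo + hi) / 2)).take (hi - (lo + hi) / 2)).sum)
                + ((top.drop (i + 1)).take ((lo + hi) / 2 - (i + 1))).sum)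
              (b + ((bot.drop lo).take (i - lo)).sum)
          = max (t + ((top.drop (i + 1)).take (hi - (i + 1))).sum)
                (b + ((bot.drop lo).take (i - lo)).sum) := by
        intro i hi'
        rw [Finset.mem_Ico] at hi'
        congr 1
        rw [add_assoc, add_comm (((top.drop ((lo + hi) / 2)).take (hi - (lo + hi) / 2)).sum),
          pv_sum_split top (i + 1) ((lo + hi) / 2) hi (by omega) (by omega)]
      have hR : ∀ i ∈ Finset.Ico ((lo + hi) / 2) hi,
          max (t + ((top.drop (i + 1)).take (hi - (i + 1))).sum)
              ((b + ((bot.drop lo).take ((lo + hi) / 2 - lo)).sum)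
                + ((bot.drop ((lo + hi) / 2)).take (i - (lo + hi) / 2)).sum)
          = max (t + ((top.drop (i + 1)).take (hi - (i + 1))).sum)
                (b + ((bot.drop lo).take (i - lo)).sum) := by
        intro i hi'
        rw [Finset.mem_Ico] at hi'
        congr 1
        rw [add_assoc, pv_sum_split bot lo ((lo + hi) / 2) i (by omega) (by omega)]
      rw [Finset.inf'_congr (Finset.nonempty_Ico.mpr hlm) rfl hL,
          Finset.inf'_congr (Finset.nonempty_Ico.mpr hmh) rfl hR,
          ← Finset.inf'_union (Finset.nonempty_Ico.mpr hlm) (Finset.nonempty_Ico.mpr hmh)]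
      simp only [Finset.Ico_union_Ico_eq_Ico (le_of_lt hlm) (le_of_lt hmh)]

-- Finset.inf' depends only on the underlying set, not on the nonemptiness proof
theorem pv_inf'_congr_set {s t : Finset Nat} (hst : s = t) (hs : s.Nonempty) (f : Nat → Int) :
    s.inf' hs f = t.inf' (hst ▸ hs) f := by
  subst hst; rfl

-- min(xs) over a nonempty mapped range equals the Finset infimum
theorem pv_min_map_range (f : Nat → Int) (n : Nat) :
    PySem.List.min? ((List.range (n + 1)).map f) (fun x => x)
      = some ((Finset.range (n + 1)).inf' Finset.nonempty_range_add_one f) := by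
  induction n with
  | zero =>
    rw [List.range_one, List.map_singleton, PySem.List.min?_id_cons]
    simp [Finset.range_one]
  | succ n ih =>
    rw [List.range_succ (n := n + 1), List.map_append, List.map_singleton]
    rw [List.range_succ_eq_map, List.map_cons] at ih ⊢
    rw [PySem.List.min?_id_cons] at ih
    rw [List.cons_append, PySem.List.min?_id_cons, List.foldl_append,
      List.foldl_cons, List.foldl_nil]
    rw [pv_inf'_congr_set (Finset.range_add_one (n := n + 1)) Finset.nonempty_range_add_one f,
      Finset.inf'_insert Finset.nonempty_range_add_one f]
    have hprev := Option.some.inj ih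
    rw [hprev, min_comm]

-- ===== VERDICT (by name: the statement is the Claim_ definition above) =====
theorem gridGame_spec : Claim_equal_gridGame := by
  intro grid _ hpre
  obtain ⟨h2, h0ne, hle⟩ := hpre
  match grid, h2 with
  | r0 :: r1 :: rest, _ =>
    simp only [List.getD_cons_zero, List.getD_cons_succ] at h0ne hle
    have hg0 : PySem.List.pyGet? (r0 :: r1 :: rest) 0 = some r0 :=
      PySem.List.pyGet?_zero_cons r0 (r1 :: rest)
    have hg1 : PySem.List.pyGet? (r0 :: r1 :: rest) 1 = some r1 := by
      rw [show (1 : Int) = ((1 : Nat) : Int) by norm_num, PySem.List.pyGet?_natCast]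
      rfl
    simp only [Spec_gridGame, gridGame, gridGame_alt, hg0, hg1, Option.getD_some,
      PySem.List.len_eq, Int.toNat_natCast]
    rw [pv_loopA r0 r1 r0.length le_rfl hle]
    rw [pv_foldl_append_map (PySem.List.pyRange 1 ((r0.length : Int) + 1) 1)
        (fun i => max (PySem.List.pyGetD (pvPfx r1 r0.length) (i - 1) 0)
          (PySem.List.pyGetD (pvPfx r0 r0.length) (-1) 0 -
            PySem.List.pyGetD (pvPfx r0 r0.length) i 0)) []]
    rw [List.nil_append]
    -- canonical candidate at split i (both sides reduce to it)
    have hcand :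
        (PySem.List.pyRange 1 ((r0.length : Int) + 1) 1).map
          (fun i => max (PySem.List.pyGetD (pvPfx r1 r0.length) (i - 1) 0)
            (PySem.List.pyGetD (pvPfx r0 r0.length) (-1) 0 -
              PySem.List.pyGetD (pvPfx r0 r0.length) i 0)) =
        (List.range r0.length).map
          (fun k => max ((r1.take k).sum) (r0.sum - (r0.take (k + 1)).sum)) := by
      rw [PySem.List.pyRange_one, List.map_map]
      have hn : (((r0.length : Int) + 1 - 1).toNat) = r0.length := by omega
      rw [hn]
      apply List.map_congr_left
      intro k hk
      rw [List.mem_range] at hk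
      simp only [Function.comp_apply]
      have e1 : (1 : Int) + (k : Int) - 1 = ((k : Nat) : Int) := by omega
      rw [e1, PySem.List.pyGetD_natCast, pvPfx_getD r1 r0.length k (by omega), pvPfx_last]
      have e2 : (1 : Int) + (k : Int) = (((k + 1 : Nat)) : Int) := by omega
      rw [e2, PySem.List.pyGetD_natCast, pvPfx_getD r0 r0.length (k + 1) (by omega),
        List.take_length]
    rw [hcand]
    obtain ⟨m, hm⟩ : ∃ m, r0.length = m + 1 :=
      ⟨r0.length - 1, by cases r0 with | nil => exact absurd rfl h0ne | cons _ _ => simp⟩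
    rw [hm, pv_min_map_range, Option.getD_some,
      pv_solve_eq r0 r1 (m + 1) 0 (m + 1) rfl (by omega) 0 0,
      pv_inf'_congr_set (congrFun Finset.range_eq_Ico (m + 1)) Finset.nonempty_range_add_one]
    apply Finset.inf'_congr _ rfl
    intro i hi'
    rw [Finset.mem_Ico] at hi'
    simp only [List.drop_zero, Nat.sub_zero, zero_add]
    rw [max_comm]
    congr 1
    have hfull : (r0.drop (i + 1)).take (m + 1 - (i + 1)) = r0.drop (i + 1) := by
      apply List.take_of_length_le
      rw [List.length_drop, hm]
    rw [hfull]
    have := List.sum_take_add_sum_drop r0 (i + 1)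
    omega
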